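-- pv_equiv track=rewrite | github.com/sunilsoni/interview-notes-python | com/interview/2024/oct/test2/StringBuilder.py | solution
-- ===== SOURCE A (Python) =====
-- from collections import Counter
-- from itertools import combinations
--
-- def solution(S, K):
--     # Count the frequency of each letter in all strings
--     letter_counts = Counter(''.join(S))
--
--     # Get unique letters used in all strings
--     unique_letters = set(''.join(S))
--
--     max_strings = 0
--
--     # Try all combinations of K letters
--     for letter_combo in combinations(unique_letters, min(K, len(unique_letters))):
--         count = sum(1 for s in S if set(s).issubset(letter_combo))
--         max_strings = max(max_strings, count)
--
--     return max_strings
-- ===== SOURCE B (Python) =====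
-- def solution(S, K):
--     # Branch-and-reduce recursion over the unique letters: include/exclude each
--     # letter, shrinking a table of distinct-letter signature groups as we go;
--     # a string is covered when its residual signature becomes empty.
--     letters = list(set(''.join(S)))
--     sig_counts = {}
--     for s in S:
--         sig = frozenset(s)
--         sig_counts[sig] = sig_counts.get(sig, 0) + 1
--     groups = list(sig_counts.items())
--
--     def dfs(letters, r, groups):
--         if r == 0:
--             return sum(cnt for sig, cnt in groups if not sig)
--         if not letters:
--             return 0
--         c, rest = letters[0], letters[1:]
--         inc = dfs(rest, r - 1, [(sig - {c}, cnt) for sig, cnt in groups])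
--         exc = dfs(rest, r, [(sig, cnt) for sig, cnt in groups if c not in sig])
--         return max(inc, exc)
--
--     return dfs(letters, min(K, len(letters)), groups)
-- ===== Notes on version B (the rewrite author's own statement) =====
-- stated objective: alternative
-- what changed: B drops the itertools combination enumeration with a full rescan of S per combination and instead recurses include/exclude over the unique letters, carrying a shrinking table of distinct-letter signature groups (a chosen letter is erased from signatures, groups containing a skipped letter are discarded) and counting the groups whose residual signature is empty when K letters are chosen.
import Mathlib
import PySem

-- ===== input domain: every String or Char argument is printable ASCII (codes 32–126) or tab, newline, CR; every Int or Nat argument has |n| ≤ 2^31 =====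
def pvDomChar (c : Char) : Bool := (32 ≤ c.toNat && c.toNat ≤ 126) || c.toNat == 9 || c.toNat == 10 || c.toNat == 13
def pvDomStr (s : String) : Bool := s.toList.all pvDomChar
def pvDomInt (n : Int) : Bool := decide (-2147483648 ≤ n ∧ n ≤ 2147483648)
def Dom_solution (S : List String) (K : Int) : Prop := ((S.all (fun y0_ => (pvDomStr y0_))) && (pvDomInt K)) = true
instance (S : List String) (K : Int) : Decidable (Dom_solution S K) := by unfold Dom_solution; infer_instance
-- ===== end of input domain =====

-- B replaces the combination enumeration with full rescans of S by an include/exclude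
-- recursion over the unique letters carrying a shrinking table of signature groups.

-- A-side helper: itertools.combinations over a duplicate-free list (all r-subsequences, in order)
def pyCombos : List Char → Nat → List (List Char)
  | _, 0 => [[]]
  | [], _ + 1 => []
  | c :: cs, r + 1 => (pyCombos cs r).map (c :: ·) ++ pyCombos cs (r + 1)

-- shared helper: ''.join(S) as a character list
def joinChars (S : List String) : List Char := S.foldl (fun acc s => acc ++ s.toList) []

-- ===== PORT A =====
-- (A's letter_counts Counter is dead code and is not ported.)
def solution (S : List String) (K : Int) : Int :=
  let unique := PySem.Set.ofList (joinChars S)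
  let r := (min K (unique.length : Int)).toNat   -- min(K, len(unique)); K ≥ 0 by Pre_solution
  (pyCombos unique r).foldl
    (fun best combo =>
      max best (S.foldl
        (fun c s => if PySem.Set.issubset (PySem.Set.ofList s.toList) combo then c + 1 else c) 0))
    0

-- ===== PORT B =====
-- frozenset(s) ported as its canonical sorted element list (structural equality = set equality): exact
def pySig (s : String) : List Char :=
  PySem.List.sorted (PySem.Set.ofList s.toList) (fun x => x) false

-- sig_counts[sig] = sig_counts.get(sig, 0) + 1 on an insertion-ordered dict with canonical keys
def bump : List (List Char × Int) → List Char → List (List Char × Int)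
  | [], k => [(k, 1)]
  | (k', v) :: rest, k => if k' = k then (k', v + 1) :: rest else (k', v) :: bump rest k

-- the include/exclude recursion of Source B's dfs: choose or skip letters[0];
-- 'sig - {c}' on a canonical sorted nodup list is exactly the filter shown
def dfsB (letters : List Char) (r : Int) (groups : List (List Char × Int)) : Int :=
  if r = 0 then ((groups.filter (fun kv => kv.1.isEmpty)).map Prod.snd).sum
  else match letters with
    | [] => 0
    | c :: rest =>
        max (dfsB rest (r - 1) (groups.map (fun kv => (kv.1.filter (· != c), kv.2))))
            (dfsB rest r (groups.filter (fun kv => decide (c ∉ kv.1))))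

def solution_alt (S : List String) (K : Int) : Int :=
  let letters := PySem.Set.ofList (joinChars S)
  let groups := S.foldl (fun t s => bump t (pySig s)) []
  dfsB letters (min K (letters.length : Int)) groups

-- ===== PRECONDITION & SPEC =====
-- Pre_ excludes K < 0, on which Python's combinations(..., min(K,U)) raises ValueError.
def Pre_solution (S : List String) (K : Int) : Prop := 0 ≤ K
instance (S : List String) (K : Int) : Decidable (Pre_solution S K) := by unfold Pre_solution; infer_instance
def pvWitness_solution : List String × Int := (["ab", "a"], 1)
def Spec_solution (S : List String) (K : Int) (out : Int) : Prop := out = solution_alt S K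
instance (S : List String) (K : Int) (out : Int) : Decidable (Spec_solution S K out) := by unfold Spec_solution; infer_instance

-- ===== CLAIM (what is proved, stated in full; the proofs are below) =====
def Claim_equal_solution : Prop := ∀ (S : List String) (K : Int), Dom_solution S K → Pre_solution S K → Spec_solution S K (solution S K)

-- ===== LEMMAS AND PROOFS =====

-- the value each combination scores against a signature table
def score (t : List (List Char × Int)) (combo : List Char) : Int :=
  ((t.filter (fun kv => PySem.Set.issubset kv.1 combo)).map Prod.snd).sum

theorem foldl_max_shift (f : List Char → Int) (l : List (List Char)) (a b : Int) :
    l.foldl (fun m x => max m (f x)) (max a b) = max a (l.foldl (fun m x => max m (f x)) b) := by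
  induction l generalizing b with
  | nil => simp
  | cons x xs ih => simp only [List.foldl_cons]; rw [max_assoc, ih]

theorem pyCombos_subset (cs : List Char) :
    ∀ (r : Nat) (combo : List Char), combo ∈ pyCombos cs r → ∀ x ∈ combo, x ∈ cs := by
  induction cs with
  | nil =>
    intro r combo h x hx
    cases r <;> simp [pyCombos] at h <;> simp [h] at hx
  | cons c cs ih =>
    intro r combo h x hx
    cases r with
    | zero => simp [pyCombos] at h; simp [h] at hx
    | succ r =>
      simp only [pyCombos, List.mem_append, List.mem_map] at h
      rcases h with ⟨combo', hc', rfl⟩ | h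
      · rcases List.mem_cons.mp hx with rfl | hx'
        · exact List.mem_cons_self
        · exact List.mem_cons_of_mem _ (ih r combo' hc' x hx')
      · exact List.mem_cons_of_mem _ (ih (r + 1) combo h x hx)

theorem sum_filter_nonneg (t : List (List Char × Int)) (p : List Char × Int → Bool)
    (h : ∀ kv ∈ t, 0 ≤ kv.2) : 0 ≤ ((t.filter p).map Prod.snd).sum := by
  apply List.sum_nonneg
  intro x hx
  rcases List.mem_map.mp hx with ⟨kv, hkv, rfl⟩
  exact h kv (List.mem_of_mem_filter hkv)

theorem dfsB_nonneg (letters : List Char) :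
    ∀ (r : Int) (t : List (List Char × Int)), (∀ kv ∈ t, 0 ≤ kv.2) → 0 ≤ dfsB letters r t := by
  induction letters with
  | nil =>
    intro r t h
    rw [dfsB]
    by_cases hr : r = 0
    · rw [if_pos hr]; exact sum_filter_nonneg t _ h
    · rw [if_neg hr]
  | cons c cs ih =>
    intro r t h
    rw [dfsB]
    by_cases hr : r = 0
    · rw [if_pos hr]; exact sum_filter_nonneg t _ h
    · rw [if_neg hr]
      have h1 : 0 ≤ dfsB cs (r - 1) (t.map (fun kv => (kv.1.filter (· != c), kv.2))) := by
        apply ih; intro kv hkv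
        rcases List.mem_map.mp hkv with ⟨kv', hkv', rfl⟩
        exact h kv' hkv'
      exact le_max_of_le_left h1

theorem issubset_nil (l : List Char) : PySem.Set.issubset l [] = l.isEmpty := by
  cases l with
  | nil =>
    rw [Bool.eq_iff_iff, PySem.Set.issubset_iff]
    simp [List.isEmpty]
  | cons x xs =>
    simp only [List.isEmpty]
    rw [Bool.eq_iff_iff, PySem.Set.issubset_iff]
    constructor
    · intro h; exact absurd (h x List.mem_cons_self) (List.not_mem_nil)
    · intro h; cases h

theorem issubset_cons_filter (sig : List Char) (c : Char) (combo : List Char) :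
    PySem.Set.issubset sig (c :: combo) = PySem.Set.issubset (sig.filter (· != c)) combo := by
  rw [Bool.eq_iff_iff, PySem.Set.issubset_iff, PySem.Set.issubset_iff]
  constructor
  · intro h x hx
    rcases List.mem_filter.mp hx with ⟨hxs, hne⟩
    rcases List.mem_cons.mp (h x hxs) with rfl | hm
    · simp at hne
    · exact hm
  · intro h x hx
    by_cases hc : x = c
    · subst hc; exact List.mem_cons_self
    · exact List.mem_cons_of_mem _ (h x (List.mem_filter.mpr ⟨hx, by simp [hc]⟩))

theorem score_cons (t : List (List Char × Int)) (c : Char) (combo : List Char) :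
    score t (c :: combo) = score (t.map (fun kv => (kv.1.filter (· != c), kv.2))) combo := by
  induction t with
  | nil => rfl
  | cons kv rest ih =>
    have ih' := ih
    simp only [score] at ih' ⊢
    simp only [List.map_cons, List.filter_cons]
    rw [issubset_cons_filter kv.1 c combo]
    by_cases h : PySem.Set.issubset (kv.1.filter (· != c)) combo
    · simp [h, ih']
    · simp [h, ih']

theorem score_filter_not_mem (t : List (List Char × Int)) (c : Char) (combo : List Char)
    (hc : c ∉ combo) : score (t.filter (fun kv => decide (c ∉ kv.1))) combo = score t combo := by
  unfold score
  congr 1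
  rw [List.filter_filter]
  congr 1
  apply List.filter_congr
  intro kv _
  by_cases hs : PySem.Set.issubset kv.1 combo
  · have hm : c ∉ kv.1 := fun hin => hc ((PySem.Set.issubset_iff _ _).mp hs c hin)
    simp [hs, hm]
  · simp [hs]

-- the central bridge: Source B's dfs equals A's max over all r-combinations of the table score
theorem dfs_eq (letters : List Char) :
    ∀ (r : Nat) (t : List (List Char × Int)), letters.Nodup → (∀ kv ∈ t, 0 ≤ kv.2) →
      dfsB letters r t
        = (pyCombos letters r).foldl (fun best combo => max best (score t combo)) 0 := by
  induction letters with
  | nil =>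
    intro r t _ h
    cases r with
    | zero =>
      have hf : (t.filter (fun kv => kv.1.isEmpty))
          = t.filter (fun kv => PySem.Set.issubset kv.1 []) := by
        apply List.filter_congr; intro kv _; rw [issubset_nil]
      have hnn : 0 ≤ score t [] := sum_filter_nonneg t _ h
      rw [dfsB, if_pos (by norm_num)]
      simp only [pyCombos, List.foldl_cons, List.foldl_nil, hf]
      show score t [] = max 0 (score t [])
      omega
    | succ r =>
      rw [dfsB, if_neg (by exact_mod_cast Nat.succ_ne_zero r)]
      simp [pyCombos]
  | cons c cs ih =>
    intro r t hnd h
    have hcs : cs.Nodup := (List.nodup_cons.mp hnd).2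
    have hcm : c ∉ cs := (List.nodup_cons.mp hnd).1
    cases r with
    | zero =>
      have hf : (t.filter (fun kv => kv.1.isEmpty))
          = t.filter (fun kv => PySem.Set.issubset kv.1 []) := by
        apply List.filter_congr; intro kv _; rw [issubset_nil]
      have hnn : 0 ≤ score t [] := sum_filter_nonneg t _ h
      rw [dfsB, if_pos (by norm_num)]
      simp only [pyCombos, List.foldl_cons, List.foldl_nil, hf]
      show score t [] = max 0 (score t [])
      omega
    | succ r =>
      have hInc : ∀ kv ∈ t.map (fun kv => (kv.1.filter (· != c), kv.2)), 0 ≤ kv.2 := by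
        intro kv hkv; rcases List.mem_map.mp hkv with ⟨kv', hkv', rfl⟩; exact h kv' hkv'
      have hExc : ∀ kv ∈ t.filter (fun kv => decide (c ∉ kv.1)), 0 ≤ kv.2 :=
        fun kv hkv => h kv (List.mem_of_mem_filter hkv)
      have part1 : ((pyCombos cs r).map (c :: ·)).foldl
            (fun best combo => max best (score t combo)) 0
          = dfsB cs (r : Int) (t.map (fun kv => (kv.1.filter (· != c), kv.2))) := by
        rw [List.foldl_map, ih r _ hcs hInc]
        apply PySem.List.foldl_congr_mem
        intro acc combo _
        rw [score_cons]
      have part2 : (pyCombos cs (r + 1)).foldl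
            (fun best combo => max best (score t combo)) 0
          = dfsB cs ((r : Int) + 1) (t.filter (fun kv => decide (c ∉ kv.1))) := by
        rw [show ((r : Int) + 1) = (((r + 1 : Nat)) : Int) by push_cast; ring,
            ih (r + 1) _ hcs hExc]
        apply PySem.List.foldl_congr_mem
        intro acc combo hmem
        rw [score_filter_not_mem]
        intro hcc
        exact hcm (pyCombos_subset cs (r + 1) combo hmem c hcc)
      have hnn : 0 ≤ dfsB cs (r : Int) (t.map (fun kv => (kv.1.filter (· != c), kv.2))) :=
        dfsB_nonneg cs (r : Int) _ hInc
      rw [dfsB, if_neg (by exact_mod_cast Nat.succ_ne_zero r)]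
      have e1 : ((r + 1 : Nat) : Int) - 1 = (r : Int) := by push_cast; ring
      have e2 : ((r + 1 : Nat) : Int) = (r : Int) + 1 := by push_cast; ring
      simp only [e1, e2, pyCombos, List.foldl_append, part1]
      rw [show ((r : Int) + 1 - 1) = (r : Int) by ring,
          show dfsB cs (r : Int) (t.map (fun kv => (kv.1.filter (· != c), kv.2)))
            = max (dfsB cs (r : Int) (t.map (fun kv => (kv.1.filter (· != c), kv.2)))) 0 by omega,
          foldl_max_shift, part2]
      rw [max_eq_left hnn]

-- one bump adds the key's indicator to the filtered value sum
theorem sum_bump (p : List Char → Bool) (t : List (List Char × Int)) (k : List Char) :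
    (((bump t k).filter (fun kv => p kv.1)).map Prod.snd).sum
      = ((t.filter (fun kv => p kv.1)).map Prod.snd).sum + (if p k then 1 else 0) := by
  induction t with
  | nil => by_cases h : p k <;> simp [bump, h]
  | cons kv rest ih =>
    obtain ⟨k', v⟩ := kv
    by_cases hk : k' = k
    · subst hk
      by_cases h : p k' <;> simp [bump, h] <;> omega
    · by_cases h : p k' <;> simp [bump, hk, h, ih] <;> omega

-- the whole table's filtered value sum counts the strings whose signature passes p
theorem sum_table (p : List Char → Bool) (S : List String) (t : List (List Char × Int)) :
    (((S.foldl (fun t s => bump t (pySig s)) t).filter (fun kv => p kv.1)).map Prod.snd).sum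
      = ((t.filter (fun kv => p kv.1)).map Prod.snd).sum
        + (S.countP (fun s => p (pySig s)) : Int) := by
  induction S generalizing t with
  | nil => simp
  | cons s rest ih =>
    simp only [List.foldl_cons, ih, sum_bump, List.countP_cons]
    by_cases h : p (pySig s) <;> simp [h] <;> push_cast <;> omega

-- bump keeps all table values nonnegative
theorem bump_nonneg (t : List (List Char × Int)) (k : List Char)
    (h : ∀ kv ∈ t, 0 ≤ kv.2) : ∀ kv ∈ bump t k, 0 ≤ kv.2 := by
  induction t with
  | nil => intro kv hkv; simp [bump] at hkv; simp [hkv]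
  | cons kv' rest ih =>
    obtain ⟨k', v⟩ := kv'
    intro kv hkv
    by_cases hk : k' = k
    · subst hk
      simp only [bump] at hkv
      rcases List.mem_cons.mp hkv with rfl | hkv
      · have := h (k', v) List.mem_cons_self; simp at this ⊢; omega
      · exact h kv (List.mem_cons_of_mem _ hkv)
    · simp [bump, hk] at hkv
      rcases hkv with hkv | hkv
      · subst hkv; exact h (k', v) List.mem_cons_self
      · exact ih (fun kv h' => h kv (List.mem_cons_of_mem _ h')) kv hkv

theorem table_nonneg (S : List String) (t : List (List Char × Int))
    (h : ∀ kv ∈ t, 0 ≤ kv.2) : ∀ kv ∈ S.foldl (fun t s => bump t (pySig s)) t, 0 ≤ kv.2 := by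
  induction S generalizing t with
  | nil => exact h
  | cons s rest ih => exact ih _ (bump_nonneg t (pySig s) h)

-- the signature has the same members as set(s), so the subset tests agree
theorem sig_issubset (s : String) (combo : List Char) :
    PySem.Set.issubset (pySig s) combo
      = PySem.Set.issubset (PySem.Set.ofList s.toList) combo := by
  have hm : ∀ x : Char, x ∈ pySig s ↔ x ∈ PySem.Set.ofList s.toList :=
    fun x => PySem.List.mem_sorted _ _ _ _
  rw [Bool.eq_iff_iff, PySem.Set.issubset_iff, PySem.Set.issubset_iff]
  constructor
  · intro h x hx; exact h x ((hm x).mpr hx)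
  · intro h x hx; exact h x ((hm x).mp hx)

-- ===== VERDICT (by name: the statement is the Claim_ definition above) =====
theorem solution_spec : Claim_equal_solution := by
  intro S K _ hK
  have hK' : (0 : Int) ≤ K := hK
  show solution S K = solution_alt S K
  simp only [solution, solution_alt]
  rw [show (min K ((PySem.Set.ofList (joinChars S)).length : Int))
        = (((min K ((PySem.Set.ofList (joinChars S)).length : Int)).toNat : Nat) : Int) from by omega]
  rw [dfs_eq _ _ _ (PySem.Set.nodup_ofList _) (table_nonneg S [] (by simp))]
  apply PySem.List.foldl_congr_mem
  intro best combo _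
  congr 1
  have hc : S.countP (fun s => PySem.Set.issubset (pySig s) combo)
      = S.countP (fun s => PySem.Set.issubset (PySem.Set.ofList s.toList) combo) :=
    List.countP_congr (fun s _ => by rw [sig_issubset])
  rw [PySem.List.foldl_if_add_one, show (score (S.foldl (fun t s => bump t (pySig s)) []) combo)
      = ((((S.foldl (fun t s => bump t (pySig s)) []).filter
          (fun kv => PySem.Set.issubset kv.1 combo)).map Prod.snd).sum) from rfl,
      sum_table (fun sig => PySem.Set.issubset sig combo) S [], hc]
  simp
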